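-- pv_equiv track=rewrite | github.com/DHILIP-S-E/AI-Virtual-Career-Counsellor | utils/nlp_utils.py | get_career_recommendations
-- ===== SOURCE A (Python) =====
-- from typing import List, Dict, Any, Set
--
-- def get_career_recommendations(keywords: Dict[str, List[str]], sentiment: str, limit: int = 3) -> List[str]:
--     """
--     Get career recommendations based on extracted keywords and sentiment.
--     This is a simplified version - in production, this would query the database.
--
--     Args:
--         keywords: Dictionary of extracted keywords by category
--         sentiment: Detected sentiment (positive, neutral, negative)
--         limit: Maximum number of recommendations to return
--
--     Returns:
--         List of recommended career titles
--     """
--     # This is a simplified mapping - in production, this would use the database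
--     career_matches = {
--         'tech': ['Software Developer', 'Data Scientist', 'Cybersecurity Analyst'],
--         'creative': ['UX Designer', 'Graphic Designer', 'Content Creator'],
--         'business': ['Product Manager', 'Digital Marketing Specialist', 'Financial Analyst'],
--         'healthcare': ['Healthcare Administrator', 'Medical Researcher', 'Health Informatics Specialist'],
--         'education': ['Instructional Designer', 'Education Technology Specialist', 'Curriculum Developer']
--     }
--
--     # Count keywords in each category
--     category_counts = {
--         category: len(kws) for category, kws in keywords.items()
--         if category != 'all'  # Exclude the 'all' category
--     }
--
--     # Sort categories by keyword count (descending)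
--     sorted_categories = sorted(category_counts.keys(), key=lambda k: category_counts[k], reverse=True)
--
--     # Get recommendations from top categories
--     recommendations = []
--     for category in sorted_categories:
--         if category in career_matches and len(recommendations) < limit:
--             # Add careers from this category that aren't already in recommendations
--             for career in career_matches[category]:
--                 if career not in recommendations and len(recommendations) < limit:
--                     recommendations.append(career)
--
--     # If we still don't have enough recommendations, add from other categories
--     if len(recommendations) < limit:
--         all_careers = [career for careers in career_matches.values() for career in careers]
--         for career in all_careers:
--             if career not in recommendations and len(recommendations) < limit:
--                 recommendations.append(career)
--
--     return recommendations[:limit]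
-- ===== SOURCE B (Python) =====
-- def get_career_recommendations(keywords, sentiment, limit=3):
--     """Flatten-then-dedup reformulation: build one ordered candidate list
--     (top-category careers, then all careers as fallback tail), dedupe with
--     dict.fromkeys, and slice once."""
--     career_matches = {
--         'tech': ['Software Developer', 'Data Scientist', 'Cybersecurity Analyst'],
--         'creative': ['UX Designer', 'Graphic Designer', 'Content Creator'],
--         'business': ['Product Manager', 'Digital Marketing Specialist', 'Financial Analyst'],
--         'healthcare': ['Healthcare Administrator', 'Medical Researcher', 'Health Informatics Specialist'],
--         'education': ['Instructional Designer', 'Education Technology Specialist', 'Curriculum Developer']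
--     }
--     category_counts = {cat: len(kws) for cat, kws in keywords.items() if cat != 'all'}
--     sorted_categories = sorted(category_counts, key=lambda k: category_counts[k], reverse=True)
--     candidates = [c for cat in sorted_categories if cat in career_matches for c in career_matches[cat]]
--     candidates += [c for careers in career_matches.values() for c in careers]
--     return list(dict.fromkeys(candidates))[:max(limit, 0)]
-- ===== Notes on version B (the rewrite author's own statement) =====
-- stated objective: simpler
-- what changed: Replaces A's two guarded append loops (membership + length checks on every step, plus a conditional fallback pass and a final slice) by building one ordered candidate list, deduplicating it once with dict.fromkeys, and taking a single slice [:max(limit,0)].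
import Mathlib
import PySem

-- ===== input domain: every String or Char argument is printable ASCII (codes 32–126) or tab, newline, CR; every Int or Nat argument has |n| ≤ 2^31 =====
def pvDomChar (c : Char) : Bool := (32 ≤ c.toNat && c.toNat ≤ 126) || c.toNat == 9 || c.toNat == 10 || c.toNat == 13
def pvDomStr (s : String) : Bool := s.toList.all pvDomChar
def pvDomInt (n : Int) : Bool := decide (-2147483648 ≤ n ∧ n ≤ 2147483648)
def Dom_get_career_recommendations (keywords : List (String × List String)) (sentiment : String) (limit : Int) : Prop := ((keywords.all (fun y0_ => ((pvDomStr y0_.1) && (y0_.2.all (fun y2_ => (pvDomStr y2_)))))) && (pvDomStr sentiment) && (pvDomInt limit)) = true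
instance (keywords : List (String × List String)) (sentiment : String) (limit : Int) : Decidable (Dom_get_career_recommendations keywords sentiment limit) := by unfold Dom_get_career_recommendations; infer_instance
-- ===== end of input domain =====

-- B replaces A's two guarded append loops by flatten + one ordered dedup + one slice; objective: simpler. 'sentiment' is unused by both.

-- ===== PORT A =====
-- shared literal: the career_matches dict (identical in Source A and Source B)
def careerMatches : PySem.Dict String (List String) :=
  PySem.Dict.ofList
    [ ("tech", ["Software Developer", "Data Scientist", "Cybersecurity Analyst"])
    , ("creative", ["UX Designer", "Graphic Designer", "Content Creator"])
    , ("business", ["Product Manager", "Digital Marketing Specialist", "Financial Analyst"])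
    , ("healthcare", ["Healthcare Administrator", "Medical Researcher", "Health Informatics Specialist"])
    , ("education", ["Instructional Designer", "Education Technology Specialist", "Curriculum Developer"]) ]

-- shared prefix (textually identical in Source A and Source B): the count dict and the stable descending sort
def categoryCounts (keywords : List (String × List String)) : PySem.Dict String Int :=
  keywords.foldl (fun d p => if p.1 ≠ "all" then d.insert p.1 (p.2.length : Int) else d) PySem.Dict.empty

def sortedCategories (keywords : List (String × List String)) : List String :=
  PySem.List.sorted (categoryCounts keywords).keys (fun k => (categoryCounts keywords).getD k 0) true

-- A's inner loop: 'if career not in recommendations and len(recommendations) < limit: recommendations.append(career)'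
def pvAddAll (limit : Int) (recs careers : List String) : List String :=
  careers.foldl (fun r c => if c ∉ r ∧ (r.length : Int) < limit then r ++ [c] else r) recs

def get_career_recommendations (keywords : List (String × List String)) (sentiment : String) (limit : Int) : List String :=
  let recs := (sortedCategories keywords).foldl
    (fun r category =>
      if careerMatches.contains category = true ∧ (r.length : Int) < limit then
        pvAddAll limit r ((careerMatches.get? category).getD [])
      else r) []
  let recs := if (recs.length : Int) < limit then
      pvAddAll limit recs (careerMatches.values.flatMap (fun careers => careers))
    else recs
  PySem.List.slice recs none (some limit)

-- ===== PORT B =====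
def get_career_recommendations_alt (keywords : List (String × List String)) (sentiment : String) (limit : Int) : List String :=
  let candidates :=
    (sortedCategories keywords).flatMap
      (fun cat => if careerMatches.contains cat = true then (careerMatches.get? cat).getD [] else [])
    ++ careerMatches.values.flatMap (fun careers => careers)
  PySem.List.slice (PySem.List.dedup candidates) none (some (max limit 0))

-- ===== PRECONDITION & SPEC =====
def Spec_get_career_recommendations (keywords : List (String × List String)) (sentiment : String) (limit : Int) (out : List String) : Prop := out = get_career_recommendations_alt keywords sentiment limit
instance (keywords : List (String × List String)) (sentiment : String) (limit : Int) (out : List String) : Decidable (Spec_get_career_recommendations keywords sentiment limit out) := by unfold Spec_get_career_recommendations; infer_instance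

-- ===== CLAIM (what is proved, stated in full; the proofs are below) =====
def Claim_equal_get_career_recommendations : Prop := ∀ (keywords : List (String × List String)) (sentiment : String) (limit : Int), Dom_get_career_recommendations keywords sentiment limit → Spec_get_career_recommendations keywords sentiment limit (get_career_recommendations keywords sentiment limit)

-- ===== LEMMAS AND PROOFS =====

-- ordered first-occurrence dedup relative to an already-seen list
def dedupFrom (seen : List String) : List String → List String
  | [] => []
  | x :: xs => if x ∈ seen then dedupFrom seen xs else x :: dedupFrom (seen ++ [x]) xs

theorem pvAddAll_of_full (limit : Int) (recs : List String) (xs : List String)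
    (h : ¬ (recs.length : Int) < limit) : pvAddAll limit recs xs = recs := by
  induction xs with
  | nil => rfl
  | cons x xs ih =>
    unfold pvAddAll
    simp only [List.foldl_cons]
    rw [if_neg (by exact fun hc => h hc.2)]
    exact ih

theorem pvAddAll_append (limit : Int) (recs : List String) (a b : List String) :
    pvAddAll limit recs (a ++ b) = pvAddAll limit (pvAddAll limit recs a) b := by
  unfold pvAddAll; exact List.foldl_append

theorem pvAddAll_eq_take_dedupFrom (limit : Int) :
    ∀ (xs recs : List String),
      pvAddAll limit recs xs = recs ++ (dedupFrom recs xs).take (limit.toNat - recs.length) := by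
  intro xs
  induction xs with
  | nil => intro recs; simp [pvAddAll, dedupFrom]
  | cons x xs ih =>
    intro recs
    unfold pvAddAll
    simp only [List.foldl_cons]
    by_cases hx : x ∈ recs
    · rw [if_neg (by exact fun hc => hc.1 hx)]
      show pvAddAll limit recs xs = _
      rw [ih recs]
      simp [dedupFrom, hx]
    · by_cases hl : (recs.length : Int) < limit
      · rw [if_pos ⟨hx, hl⟩]
        show pvAddAll limit (recs ++ [x]) xs = _
        rw [ih (recs ++ [x])]
        have h1 : limit.toNat - recs.length = (limit.toNat - (recs ++ [x]).length) + 1 := by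
          simp only [List.length_append, List.length_cons, List.length_nil]
          omega
        rw [dedupFrom, if_neg hx, h1, List.take_succ_cons]
        simp
      · rw [if_neg (by exact fun hc => hl hc.2)]
        show pvAddAll limit recs xs = _
        rw [ih recs]
        have h0 : limit.toNat - recs.length = 0 := by omega
        rw [dedupFrom, if_neg hx, h0]
        simp

theorem foldl_setAdd_eq_dedupFrom :
    ∀ (xs seen : List String), List.foldl PySem.Set.add seen xs = seen ++ dedupFrom seen xs := by
  intro xs
  induction xs with
  | nil => intro seen; simp [dedupFrom]
  | cons x xs ih =>
    intro seen
    simp only [List.foldl_cons]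
    by_cases hx : x ∈ seen
    · have : PySem.Set.add seen x = seen := by
        simp [PySem.Set.add, hx]
      rw [this, ih seen, dedupFrom, if_pos hx]
    · have : PySem.Set.add seen x = seen ++ [x] := by
        simp [PySem.Set.add, hx]
      rw [this, ih (seen ++ [x]), dedupFrom, if_neg hx]
      simp

theorem dedup_eq_dedupFrom (xs : List String) : PySem.List.dedup xs = dedupFrom [] xs := by
  have h := foldl_setAdd_eq_dedupFrom xs []
  simpa [PySem.List.dedup, PySem.Set.ofList, PySem.Set.empty] using h

theorem outer_fold_eq (limit : Int) :
    ∀ (cats recs : List String),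
      cats.foldl
        (fun r category =>
          if careerMatches.contains category = true ∧ (r.length : Int) < limit then
            pvAddAll limit r ((careerMatches.get? category).getD [])
          else r) recs
      = pvAddAll limit recs
          (cats.flatMap
            (fun cat => if careerMatches.contains cat = true then (careerMatches.get? cat).getD [] else [])) := by
  intro cats
  induction cats with
  | nil => intro recs; simp [pvAddAll]
  | cons c cats ih =>
    intro recs
    simp only [List.foldl_cons, List.flatMap_cons]
    by_cases hc : careerMatches.contains c = true
    · rw [if_pos hc, pvAddAll_append]
      by_cases hl : (recs.length : Int) < limit
      · rw [if_pos ⟨hc, hl⟩, ih]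
      · rw [if_neg (by exact fun h => hl h.2), pvAddAll_of_full limit recs _ hl, ih]
    · rw [if_neg (by exact fun h => hc h.1), if_neg hc, ih]
      simp

theorem slice_take_of_le (l : List String) (limit : Int) :
    PySem.List.slice (l.take limit.toNat) none (some limit) = l.take limit.toNat := by
  by_cases h : 0 ≤ limit
  · rw [PySem.List.slice_to _ h]
    simp
  · have h0 : limit.toNat = 0 := by omega
    rw [h0]
    simp [PySem.List.slice]

-- ===== VERDICT (by name: the statement is the Claim_ definition above) =====
theorem get_career_recommendations_spec : Claim_equal_get_career_recommendations := by
  intro keywords sentiment limit _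
  unfold Spec_get_career_recommendations get_career_recommendations get_career_recommendations_alt
  simp only []
  set cats := sortedCategories keywords with hcats
  set front := cats.flatMap
      (fun cat => if careerMatches.contains cat = true then (careerMatches.get? cat).getD [] else []) with hfront
  set tail := careerMatches.values.flatMap (fun careers => careers) with htail
  have h1 : (cats.foldl
      (fun r category =>
        if careerMatches.contains category = true ∧ (r.length : Int) < limit then
          pvAddAll limit r ((careerMatches.get? category).getD [])
        else r) []) = pvAddAll limit [] front := outer_fold_eq limit cats []
  rw [h1]
  have h2 : (if ((pvAddAll limit [] front).length : Int) < limit then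
      pvAddAll limit (pvAddAll limit [] front) tail else pvAddAll limit [] front)
      = pvAddAll limit [] (front ++ tail) := by
    rw [pvAddAll_append]
    by_cases hl : ((pvAddAll limit [] front).length : Int) < limit
    · rw [if_pos hl]
    · rw [if_neg hl, pvAddAll_of_full limit _ tail hl]
  rw [h2]
  have h3 : pvAddAll limit [] (front ++ tail)
      = (PySem.List.dedup (front ++ tail)).take limit.toNat := by
    rw [pvAddAll_eq_take_dedupFrom limit (front ++ tail) [], dedup_eq_dedupFrom]
    simp
  rw [h3, slice_take_of_le]
  have h4 : 0 ≤ max limit 0 := le_max_right _ _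
  rw [PySem.List.slice_to _ h4]
  congr 1
  omega
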